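-- pv_equiv track=rewrite | github.com/lewis841214/def_lef_py | src/lef_parser.py | _is_block_start
-- ===== SOURCE A (Python) =====
-- def _is_block_start(line: str) -> bool:
--     """Check if line starts a block"""
--     block_starters = [
--         'UNITS', 'PROPERTYDEFINITIONS', 'SPACING', 'IRDROP', 'NOISETABLE',
--         'LAYER', 'VIA', 'VIARULE', 'NONDEFAULTRULE', 'SITE', 'ARRAY',
--         'MACRO', 'PIN', 'TIMING', 'OBS', 'DENSITY', 'PORT', 'FLOORPLAN'
--     ]
--
--     for starter in block_starters:
--         if line.startswith(starter + ' ') or line == starter: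
--             return True
--     return False
-- ===== SOURCE B (Python) =====
-- _BLOCK_STARTERS = frozenset([
--     'UNITS', 'PROPERTYDEFINITIONS', 'SPACING', 'IRDROP', 'NOISETABLE',
--     'LAYER', 'VIA', 'VIARULE', 'NONDEFAULTRULE', 'SITE', 'ARRAY',
--     'MACRO', 'PIN', 'TIMING', 'OBS', 'DENSITY', 'PORT', 'FLOORPLAN'
-- ])
--
--
-- def _is_block_start(line: str) -> bool:
--     """Check if line starts a block"""
--     return line.partition(' ')[0] in _BLOCK_STARTERS
-- ===== Notes on version B (the rewrite author's own statement) =====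
-- stated objective: idiomatic
-- what changed: Replaces the scan over 18 starters with string-concatenation and prefix tests per starter by extracting the leading space-delimited token once (partition) and doing a single frozenset membership lookup.
import Mathlib
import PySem

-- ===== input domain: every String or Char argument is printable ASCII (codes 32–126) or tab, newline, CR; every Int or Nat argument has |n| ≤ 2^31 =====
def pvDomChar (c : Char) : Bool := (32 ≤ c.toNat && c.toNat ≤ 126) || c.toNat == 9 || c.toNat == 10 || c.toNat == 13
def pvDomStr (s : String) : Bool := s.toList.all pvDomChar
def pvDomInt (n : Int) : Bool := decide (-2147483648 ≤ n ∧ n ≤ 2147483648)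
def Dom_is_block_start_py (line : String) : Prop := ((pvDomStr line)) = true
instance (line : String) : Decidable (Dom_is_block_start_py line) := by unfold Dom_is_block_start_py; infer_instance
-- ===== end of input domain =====

-- B replaces A's per-starter prefix-test loop by extracting the leading space-delimited
-- token once and testing membership in a set (more idiomatic; no speed claim).

-- ===== PORT A =====
-- A's for-loop over the starters with early 'return True'
def pvLoopA (line : String) : List String → Bool
  | [] => false
  | starter :: rest =>
      if PySem.Str.startswith line (starter ++ " ") || line == starter then true
      else pvLoopA line rest

def is_block_start_py (line : String) : Bool :=
  pvLoopA line
    ["UNITS", "PROPERTYDEFINITIONS", "SPACING", "IRDROP", "NOISETABLE",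
     "LAYER", "VIA", "VIARULE", "NONDEFAULTRULE", "SITE", "ARRAY",
     "MACRO", "PIN", "TIMING", "OBS", "DENSITY", "PORT", "FLOORPLAN"]

-- ===== PORT B =====
def pvBlockStarters : PySem.Set String :=
  PySem.Set.ofList
    ["UNITS", "PROPERTYDEFINITIONS", "SPACING", "IRDROP", "NOISETABLE",
     "LAYER", "VIA", "VIARULE", "NONDEFAULTRULE", "SITE", "ARRAY",
     "MACRO", "PIN", "TIMING", "OBS", "DENSITY", "PORT", "FLOORPLAN"]

-- line.partition(' ')[0] : hand port, exact — with a one-char separator the first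
-- component of str.partition is exactly the maximal prefix free of that char.
def is_block_start_py_alt (line : String) : Bool :=
  PySem.Set.contains pvBlockStarters (String.ofList (line.toList.takeWhile (fun c => c != ' ')))

-- ===== PRECONDITION & SPEC =====
def Spec_is_block_start_py (line : String) (out : Bool) : Prop := out = is_block_start_py_alt line
instance (line : String) (out : Bool) : Decidable (Spec_is_block_start_py line out) := by unfold Spec_is_block_start_py; infer_instance

-- ===== CLAIM (what is proved, stated in full; the proofs are below) =====
def Claim_equal_is_block_start_py : Prop := ∀ (line : String), Dom_is_block_start_py line → Spec_is_block_start_py line (is_block_start_py line)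

-- ===== LEMMAS AND PROOFS =====

-- Core: for a space-free word s, "l starts with s ++ ' ' or equals s" is exactly
-- "l's leading space-free token is s".
theorem pv_key (s l : List Char) (h : ' ' ∉ s) :
    ((s ++ [' ']) <+: l ∨ l = s) ↔ l.takeWhile (fun c => c != ' ') = s := by
  induction s generalizing l with
  | nil =>
      cases l with
      | nil => simp
      | cons c t =>
          constructor
          · rintro (⟨u, hu⟩ | he)
            · cases hu; simp
            · simp at he
          · intro ht
            by_cases hc : c = ' '
            · subst hc; exact Or.inl ⟨t, rfl⟩
            · simp [hc] at ht
  | cons a s' ih =>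
      have ha : a ≠ ' ' := fun he => h (he ▸ List.mem_cons_self ..)
      have hs' : ' ' ∉ s' := fun hm => h (List.mem_cons_of_mem _ hm)
      cases l with
      | nil => simp
      | cons c t =>
          by_cases hc : c = ' '
          · subst hc
            simp [List.cons_prefix_cons, eq_comm, ha]
          · simp only [List.cons_append, List.cons_prefix_cons, List.cons.injEq,
              List.takeWhile_cons, if_pos (by simp [hc] : (c != ' ') = true)]
            rw [← ih t hs']
            tauto

-- One starter's test in A equals a token comparison.
theorem pv_step (line s : String) (h : ' ' ∉ s.toList) :
    (PySem.Str.startswith line (s ++ " ") || line == s)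
      = (s == String.ofList (line.toList.takeWhile (fun c => c != ' '))) := by
  rw [Bool.eq_iff_iff]
  simp only [Bool.or_eq_true, beq_iff_eq, PySem.Str.startswith_eq, PySem.Chars.startswith_iff]
  have hcat : (s ++ " ").toList = s.toList ++ [' '] := by simp
  rw [hcat]
  constructor
  · intro hl
    have hk := (pv_key s.toList line.toList h).mp (by
      rcases hl with hp | he
      · exact Or.inl hp
      · exact Or.inr (by rw [he]))
    apply String.toList_inj.mp
    simp [hk]
  · intro he
    have ht : line.toList.takeWhile (fun c => c != ' ') = s.toList := by
      rw [he]; simp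
    rcases (pv_key s.toList line.toList h).mpr ht with hp | he2
    · exact Or.inl hp
    · exact Or.inr (String.toList_inj.mp he2)

-- The whole early-return loop equals membership of the token in the starter list.
theorem pv_loop (line : String) (L : List String) (h : ∀ s ∈ L, ' ' ∉ s.toList) :
    pvLoopA line L
      = L.contains (String.ofList (line.toList.takeWhile (fun c => c != ' '))) := by
  induction L with
  | nil => simp [pvLoopA]
  | cons s rest ih =>
      rw [pvLoopA, pv_step line s (h s (List.mem_cons_self ..)),
        ih (fun x hx => h x (List.mem_cons_of_mem _ hx)), List.contains_cons]
      have hcomm : ∀ (a b : String), (a == b) = (b == a) := fun a b =>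
        Bool.eq_iff_iff.mpr ⟨fun hx => beq_iff_eq.mpr (beq_iff_eq.mp hx).symm,
          fun hx => beq_iff_eq.mpr (beq_iff_eq.mp hx).symm⟩
      conv_rhs => rw [hcomm]
      cases hb : (s == String.ofList (line.toList.takeWhile (fun c => c != ' '))) <;> simp

-- ===== VERDICT (by name: the statement is the Claim_ definition above) =====
theorem is_block_start_py_spec : Claim_equal_is_block_start_py := by
  intro line _
  show is_block_start_py line = is_block_start_py_alt line
  rw [is_block_start_py, pv_loop line _ (by decide)]
  rfl
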